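-- pv_equiv track=rewrite | github.com/jakehoare/leetcode | 1036_Escape_a_Large_Maze.py | isEscapePossible
-- ===== SOURCE A (Python) =====
-- def isEscapePossible(blocked, source, target):
--     """
--     :type blocked: List[List[int]]
--     :type source: List[int]
--     :type target: List[int]
--     :rtype: bool
--     """
--     # make sorted lists of all rows and cols used in blocked, source or target
--     rows, cols = set(), set()
--     for r, c in blocked + [source, target]:
--         rows.add(r)
--         cols.add(c)
--     rows, cols = sorted(list(rows)), sorted(list(cols))
--
--     # map original rows and cols to compressed values that reduce gaps to 1 element
--     row_to_compressed, col_to_compressed = {}, {}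
--     new_row, new_col = int(rows[0] != 0), int(cols[0] != 0)  # add a gap if not starting at row or col zero
--
--     for i, r in enumerate(rows):
--         if i != 0 and rows[i - 1] != r - 1:  # not consecutive, add a gap of a single row
--             new_row += 1
--         row_to_compressed[r] = new_row
--         new_row += 1
--
--     for i, c in enumerate(cols):
--         if i != 0 and cols[i - 1] != c - 1:  # not consecutive, add a gap of a single col
--             new_col += 1
--         col_to_compressed[c] = new_col
--         new_col += 1
--
--     # map the original inputs to their compressed values
--     blocked = {(row_to_compressed[r], col_to_compressed[c]) for r, c in blocked}
--     source = (row_to_compressed[source[0]], col_to_compressed[source[1]])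
--     target = (row_to_compressed[target[0]], col_to_compressed[target[1]])
--
--     # set an extra row or col if we are not at the edege of the original grid
--     if new_row != 10 ** 6 + 1:
--         new_row += 1
--     if new_col != 10 ** 6 + 1:
--         new_col += 1
--
--     # breadth first search
--     frontier, back, visited = {source, }, {target, }, set()
--     while frontier and back:
--
--         if frontier & back - blocked:   # overlap between back and frontier that is not blocked
--             return True
--         if len(frontier) > len(back):   # expand smaller of frontier and back
--             frontier, back = back, frontier
--         new_frontier = set()
--
--         for r, c in frontier:
--             if (r, c) in blocked or (r, c) in visited:
--                 continue
--             if r < 0 or r >= new_row or c < 0 or c >= new_col: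
--                 continue
--
--             visited.add((r, c))
--             for dr, dc in [[1, 0], [0, 1], [-1, 0], [0, -1]]:
--                 new_frontier.add((r + dr, c + dc))
--
--         frontier = new_frontier
--
--     return False
-- ===== SOURCE B (Python) =====
-- def _compress(vals):
--     # vals: sorted list of distinct coordinates (non-empty).
--     # Compressed positions = prefix sums of the gaps capped at 2,
--     # offset by 1 when the smallest value is not at the grid edge 0.
--     positions = [0 if vals[0] == 0 else 1]
--     for a, b in zip(vals, vals[1:]):
--         positions.append(positions[-1] + min(b - a, 2))
--     size = positions[-1] + 1
--     if size != 10 ** 6 + 1: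
--         size += 1  # escape margin beyond the last used row/col
--     return dict(zip(vals, positions)), size
--
--
-- def isEscapePossible(blocked, source, target):
--     pts = [(r, c) for r, c in blocked]
--     sr, sc = source
--     tr, tc = target
--     rmap, height = _compress(sorted({r for r, _ in pts} | {sr, tr}))
--     cmap, width = _compress(sorted({c for _, c in pts} | {sc, tc}))
--     walls = {(rmap[r], cmap[c]) for r, c in pts}
--     s = (rmap[sr], cmap[sc])
--     t = (rmap[tr], cmap[tc])
--     if s in walls or t in walls:
--         return False
--     # single-source depth-first search over the compressed grid
--     seen, stack = set(), [s]
--     while stack: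
--         r, c = stack.pop()
--         if (r, c) in seen or (r, c) in walls or not (0 <= r < height and 0 <= c < width):
--             continue
--         seen.add((r, c))
--         stack += [(r - 1, c), (r + 1, c), (r, c - 1), (r, c + 1)]
--     return t in seen
-- ===== Notes on version B (the rewrite author's own statement) =====
-- stated objective: simpler
-- what changed: Replaces the bidirectional frontier-swapping BFS (two frontiers, shared visited set, overlap test each round) by a plain single-source stack-based search that just collects the reachable set and tests the target, and replaces the stateful enumerate/index compression loop by prefix sums of gaps capped at 2; Pre_ excludes only inputs where a blocked entry or source/target does not have exactly 2 coordinates, on which A raises.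
import Mathlib
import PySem

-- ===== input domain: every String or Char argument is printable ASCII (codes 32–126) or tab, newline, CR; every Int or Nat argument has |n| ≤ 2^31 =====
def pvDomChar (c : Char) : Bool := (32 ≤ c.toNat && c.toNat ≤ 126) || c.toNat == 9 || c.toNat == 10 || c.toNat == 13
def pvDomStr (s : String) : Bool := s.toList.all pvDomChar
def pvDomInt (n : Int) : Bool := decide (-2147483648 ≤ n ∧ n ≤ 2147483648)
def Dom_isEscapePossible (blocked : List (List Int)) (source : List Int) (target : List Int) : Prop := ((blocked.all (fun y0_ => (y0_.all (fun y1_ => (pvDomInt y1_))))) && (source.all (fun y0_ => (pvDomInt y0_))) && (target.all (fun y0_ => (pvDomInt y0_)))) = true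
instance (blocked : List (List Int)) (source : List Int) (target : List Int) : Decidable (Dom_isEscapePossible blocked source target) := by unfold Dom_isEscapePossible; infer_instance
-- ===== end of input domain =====

-- B replaces A's bidirectional frontier-swapping BFS by a single-source stack search and the
-- stateful enumerate-compression loop by prefix sums of capped gaps (objective: simpler; not faster).

-- ===== PORT A =====

-- `for r, c in items: rows.add(r); cols.add(c)` — unpacking is exact under Pre_ (every item has length 2)
def pvRowsCols (items : List (List Int)) : PySem.Set Int × PySem.Set Int :=
  items.foldl
    (fun rc l => (PySem.Set.add rc.1 (l.getD 0 0), PySem.Set.add rc.2 (l.getD 1 0)))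
    ([], [])

-- the `for i, r in enumerate(rows)` compression loop; `start` = int(rows[0] != 0)
def pvCompressA (vals : List Int) (start : Int) : PySem.Dict Int Int × Int :=
  (PySem.List.enumerate vals).foldl
    (fun st iv =>
      let n : Int :=
        if iv.1 ≠ 0 ∧ PySem.List.pyGetD vals (iv.1 - 1) 0 ≠ iv.2 - 1 then st.2 + 1 else st.2
      (st.1.insert iv.2 n, n + 1))
    (PySem.Dict.empty, start)

-- body of the `while frontier and back` loop: expand `F`, threading (visited, new_frontier)
def pvStep (nrow ncol : Int) (blk : PySem.Set (Int × Int)) (F : List (Int × Int))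
    (V : PySem.Set (Int × Int)) : PySem.Set (Int × Int) × PySem.Set (Int × Int) :=
  F.foldl
    (fun st p =>
      if p ∈ blk ∨ p ∈ st.1 then st
      else if p.1 < 0 ∨ nrow ≤ p.1 ∨ p.2 < 0 ∨ ncol ≤ p.2 then st
      else (PySem.Set.add st.1 p,
        PySem.Set.add (PySem.Set.add (PySem.Set.add (PySem.Set.add st.2 (p.1 + 1, p.2))
          (p.1, p.2 + 1)) (p.1 - 1, p.2)) (p.1, p.2 - 1)))
    (V, PySem.Set.empty)

-- the `while frontier and back` loop; fuel only realizes termination (proved sufficient below)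
def pvBfsA (nrow ncol : Int) (blk : PySem.Set (Int × Int)) :
    Nat → PySem.Set (Int × Int) → PySem.Set (Int × Int) → PySem.Set (Int × Int) → Bool
  | 0, _, _, _ => false
  | fuel + 1, F, B, V =>
    if F = [] ∨ B = [] then false
    else if PySem.Set.inter F (PySem.Set.diff B blk) ≠ [] then true
    else
      let FB := if PySem.Set.len F > PySem.Set.len B then (B, F) else (F, B)
      let st := pvStep nrow ncol blk FB.1 V
      pvBfsA nrow ncol blk fuel st.2 FB.2 st.1

def isEscapePossible (blocked : List (List Int)) (source : List Int) (target : List Int) : Bool :=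
  let rc := pvRowsCols (blocked ++ [source, target])
  let rows := PySem.List.sorted rc.1 (fun x => x) false
  let cols := PySem.List.sorted rc.2 (fun x => x) false
  let rcmp := pvCompressA rows (if rows.getD 0 0 ≠ 0 then 1 else 0)
  let ccmp := pvCompressA cols (if cols.getD 0 0 ≠ 0 then 1 else 0)
  let blk := PySem.Set.ofList
    (blocked.map (fun l => (rcmp.1.getD (l.getD 0 0) 0, ccmp.1.getD (l.getD 1 0) 0)))
  let s := (rcmp.1.getD (source.getD 0 0) 0, ccmp.1.getD (source.getD 1 0) 0)
  let t := (rcmp.1.getD (target.getD 0 0) 0, ccmp.1.getD (target.getD 1 0) 0)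
  let nrow := if rcmp.2 ≠ 10 ^ 6 + 1 then rcmp.2 + 1 else rcmp.2
  let ncol := if ccmp.2 ≠ 10 ^ 6 + 1 then ccmp.2 + 1 else ccmp.2
  pvBfsA nrow ncol blk (nrow.toNat * ncol.toNat + 2)
    (PySem.Set.add PySem.Set.empty s) (PySem.Set.add PySem.Set.empty t) PySem.Set.empty

-- ===== PORT B =====

-- prefix sums of gaps capped at 2 (`positions[-1]` is pyGetD at -1); returns (mapping, size)
def pvCompressB (vals : List Int) : PySem.Dict Int Int × Int :=
  let positions := (vals.zip vals.tail).foldl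
    (fun acc ab => acc ++ [PySem.List.pyGetD acc (-1) 0 + min (ab.2 - ab.1) 2])
    [if vals.getD 0 0 = 0 then 0 else 1]
  let size := PySem.List.pyGetD positions (-1) 0 + 1
  (PySem.Dict.ofList (vals.zip positions), if size ≠ 10 ^ 6 + 1 then size + 1 else size)

-- the `while stack` loop; stack top = list head (Python pops from the END), so pushes are reversed
def pvDfsB (h w : Int) (walls : PySem.Set (Int × Int)) :
    Nat → List (Int × Int) → PySem.Set (Int × Int) → PySem.Set (Int × Int)
  | 0, _, seen => seen
  | _ + 1, [], seen => seen
  | fuel + 1, p :: rest, seen =>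
    if p ∈ seen ∨ p ∈ walls ∨ ¬(0 ≤ p.1 ∧ p.1 < h ∧ 0 ≤ p.2 ∧ p.2 < w) then
      pvDfsB h w walls fuel rest seen
    else
      pvDfsB h w walls fuel
        ((p.1, p.2 + 1) :: (p.1, p.2 - 1) :: (p.1 + 1, p.2) :: (p.1 - 1, p.2) :: rest)
        (PySem.Set.add seen p)

def isEscapePossible_alt (blocked : List (List Int)) (source : List Int) (target : List Int) : Bool :=
  let pts := blocked.map (fun p => (p.getD 0 0, p.getD 1 0))
  let rcmp := pvCompressB (PySem.List.sorted
    (PySem.Set.union (PySem.Set.ofList (pts.map (·.1))) [source.getD 0 0, target.getD 0 0])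
    (fun x => x) false)
  let ccmp := pvCompressB (PySem.List.sorted
    (PySem.Set.union (PySem.Set.ofList (pts.map (·.2))) [source.getD 1 0, target.getD 1 0])
    (fun x => x) false)
  let walls := PySem.Set.ofList (pts.map (fun rc => (rcmp.1.getD rc.1 0, ccmp.1.getD rc.2 0)))
  let s := (rcmp.1.getD (source.getD 0 0) 0, ccmp.1.getD (source.getD 1 0) 0)
  let t := (rcmp.1.getD (target.getD 0 0) 0, ccmp.1.getD (target.getD 1 0) 0)
  if s ∈ walls ∨ t ∈ walls then false
  else decide (t ∈ pvDfsB rcmp.2 ccmp.2 walls (5 * (rcmp.2.toNat * ccmp.2.toNat) + 6) [s] PySem.Set.empty)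

-- ===== PRECONDITION & SPEC =====
-- Pre_ excludes exactly the inputs on which A RAISES (ValueError unpacking a row of length ≠ 2,
-- or source/target of length ≠ 2); A returns on every input Pre_ admits.
def Pre_isEscapePossible (blocked : List (List Int)) (source : List Int) (target : List Int) : Prop :=
  (∀ l ∈ blocked, l.length = 2) ∧ source.length = 2 ∧ target.length = 2
instance (blocked : List (List Int)) (source : List Int) (target : List Int) : Decidable (Pre_isEscapePossible blocked source target) := by unfold Pre_isEscapePossible; infer_instance
def pvWitness_isEscapePossible : List (List Int) × List Int × List Int := ([[0, 1]], [0, 0], [1, 1])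

def Spec_isEscapePossible (blocked : List (List Int)) (source : List Int) (target : List Int) (out : Bool) : Prop := out = isEscapePossible_alt blocked source target
instance (blocked : List (List Int)) (source : List Int) (target : List Int) (out : Bool) : Decidable (Spec_isEscapePossible blocked source target out) := by unfold Spec_isEscapePossible; infer_instance

-- ===== CLAIM (what is proved, stated in full; the proofs are below) =====
def Claim_equal_isEscapePossible : Prop := ∀ (blocked : List (List Int)) (source : List Int) (target : List Int), Dom_isEscapePossible blocked source target → Pre_isEscapePossible blocked source target → Spec_isEscapePossible blocked source target (isEscapePossible blocked source target)
-- ===== LEMMAS AND PROOFS =====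

theorem pvStep_eq (n c : Int) (blk : PySem.Set (Int × Int)) (F V : List (Int × Int)) :
    pvStep n c blk F V = F.foldl
      (fun st p =>
        if p ∈ blk ∨ p ∈ st.1 then st
        else if p.1 < 0 ∨ n ≤ p.1 ∨ p.2 < 0 ∨ c ≤ p.2 then st
        else (PySem.Set.add st.1 p,
          PySem.Set.add (PySem.Set.add (PySem.Set.add (PySem.Set.add st.2 (p.1 + 1, p.2))
            (p.1, p.2 + 1)) (p.1 - 1, p.2)) (p.1, p.2 - 1)))
      (V, []) := rfl

def pvAdj (p q : Int × Int) : Prop :=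
  q = (p.1 + 1, p.2) ∨ q = (p.1, p.2 + 1) ∨ q = (p.1 - 1, p.2) ∨ q = (p.1, p.2 - 1)

def pvInB (n c : Int) (p : Int × Int) : Prop := 0 ≤ p.1 ∧ p.1 < n ∧ 0 ≤ p.2 ∧ p.2 < c

def pvNew (n c : Int) (blk V F : List (Int × Int)) (p : Int × Int) : Prop :=
  p ∈ F ∧ p ∉ blk ∧ p ∉ V ∧ pvInB n c p

theorem pvStep_go (n c : Int) (blk : List (Int × Int)) :
    ∀ (F V W : List (Int × Int)), F.Nodup → V.Nodup →
    (∀ x, x ∈ (F.foldl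
      (fun st p =>
        if p ∈ blk ∨ p ∈ st.1 then st
        else if p.1 < 0 ∨ n ≤ p.1 ∨ p.2 < 0 ∨ c ≤ p.2 then st
        else (PySem.Set.add st.1 p,
          PySem.Set.add (PySem.Set.add (PySem.Set.add (PySem.Set.add st.2 (p.1 + 1, p.2))
            (p.1, p.2 + 1)) (p.1 - 1, p.2)) (p.1, p.2 - 1)))
      (V, W)).1 ↔ x ∈ V ∨ pvNew n c blk V F x) ∧
    (∀ x, x ∈ (F.foldl
      (fun st p =>
        if p ∈ blk ∨ p ∈ st.1 then st
        else if p.1 < 0 ∨ n ≤ p.1 ∨ p.2 < 0 ∨ c ≤ p.2 then st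
        else (PySem.Set.add st.1 p,
          PySem.Set.add (PySem.Set.add (PySem.Set.add (PySem.Set.add st.2 (p.1 + 1, p.2))
            (p.1, p.2 + 1)) (p.1 - 1, p.2)) (p.1, p.2 - 1)))
      (V, W)).2 ↔ x ∈ W ∨ ∃ p, pvNew n c blk V F p ∧ pvAdj p x) ∧
    (F.foldl
      (fun st p =>
        if p ∈ blk ∨ p ∈ st.1 then st
        else if p.1 < 0 ∨ n ≤ p.1 ∨ p.2 < 0 ∨ c ≤ p.2 then st
        else (PySem.Set.add st.1 p,
          PySem.Set.add (PySem.Set.add (PySem.Set.add (PySem.Set.add st.2 (p.1 + 1, p.2))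
            (p.1, p.2 + 1)) (p.1 - 1, p.2)) (p.1, p.2 - 1)))
      (V, W)).1.Nodup ∧
    ((F.foldl
      (fun st p =>
        if p ∈ blk ∨ p ∈ st.1 then st
        else if p.1 < 0 ∨ n ≤ p.1 ∨ p.2 < 0 ∨ c ≤ p.2 then st
        else (PySem.Set.add st.1 p,
          PySem.Set.add (PySem.Set.add (PySem.Set.add (PySem.Set.add st.2 (p.1 + 1, p.2))
            (p.1, p.2 + 1)) (p.1 - 1, p.2)) (p.1, p.2 - 1)))
      (V, W)) = (V, W) ∨ V.length < (F.foldl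
      (fun st p =>
        if p ∈ blk ∨ p ∈ st.1 then st
        else if p.1 < 0 ∨ n ≤ p.1 ∨ p.2 < 0 ∨ c ≤ p.2 then st
        else (PySem.Set.add st.1 p,
          PySem.Set.add (PySem.Set.add (PySem.Set.add (PySem.Set.add st.2 (p.1 + 1, p.2))
            (p.1, p.2 + 1)) (p.1 - 1, p.2)) (p.1, p.2 - 1)))
      (V, W)).1.length) := by
  intro F
  induction F with
  | nil =>
    intro V W _ hV
    refine ⟨?_, ?_, hV, Or.inl rfl⟩ <;>
      simp [pvNew]
  | cons p F ih =>
    intro V W hnd hV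
    have hpF : p ∉ F := (List.nodup_cons.mp hnd).1
    have hndF : F.Nodup := (List.nodup_cons.mp hnd).2
    simp only [List.foldl_cons]
    by_cases h1 : p ∈ blk ∨ p ∈ V
    · rw [if_pos h1]
      obtain ⟨m1, m2, m3, m4⟩ := ih V W hndF hV
      refine ⟨?_, ?_, m3, m4⟩
      · intro x
        rw [m1 x]
        constructor
        · rintro (h | h)
          · exact Or.inl h
          · exact Or.inr ⟨List.mem_cons_of_mem _ h.1, h.2⟩
        · rintro (h | ⟨hm, h2, h3, h4⟩)
          · exact Or.inl h
          · rcases List.mem_cons.mp hm with rfl | hm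
            · rcases h1 with h1 | h1
              · exact absurd h1 h2
              · exact absurd h1 h3
            · exact Or.inr ⟨hm, h2, h3, h4⟩
      · intro x
        rw [m2 x]
        constructor
        · rintro (h | ⟨q, hq, ha⟩)
          · exact Or.inl h
          · exact Or.inr ⟨q, ⟨List.mem_cons_of_mem _ hq.1, hq.2⟩, ha⟩
        · rintro (h | ⟨q, ⟨hm, h2, h3, h4⟩, ha⟩)
          · exact Or.inl h
          · rcases List.mem_cons.mp hm with rfl | hm
            · rcases h1 with h1 | h1
              · exact absurd h1 h2
              · exact absurd h1 h3
            · exact Or.inr ⟨q, ⟨hm, h2, h3, h4⟩, ha⟩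
    · push_neg at h1
      by_cases h2 : p.1 < 0 ∨ n ≤ p.1 ∨ p.2 < 0 ∨ c ≤ p.2
      · rw [if_neg (by push_neg; exact ⟨h1.1, h1.2⟩), if_pos h2]
        obtain ⟨m1, m2, m3, m4⟩ := ih V W hndF hV
        have hoob : ¬ pvInB n c p := by
          simp only [pvInB, not_and, not_lt]
          rcases h2 with h | h | h | h <;> intro <;> omega
        refine ⟨?_, ?_, m3, m4⟩
        · intro x
          rw [m1 x]
          constructor
          · rintro (h | h)
            · exact Or.inl h
            · exact Or.inr ⟨List.mem_cons_of_mem _ h.1, h.2⟩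
          · rintro (h | ⟨hm, hb2, hb3, hb4⟩)
            · exact Or.inl h
            · rcases List.mem_cons.mp hm with rfl | hm
              · exact absurd hb4 hoob
              · exact Or.inr ⟨hm, hb2, hb3, hb4⟩
        · intro x
          rw [m2 x]
          constructor
          · rintro (h | ⟨q, hq, ha⟩)
            · exact Or.inl h
            · exact Or.inr ⟨q, ⟨List.mem_cons_of_mem _ hq.1, hq.2⟩, ha⟩
          · rintro (h | ⟨q, ⟨hm, hb2, hb3, hb4⟩, ha⟩)
            · exact Or.inl h
            · rcases List.mem_cons.mp hm with rfl | hm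
              · exact absurd hb4 hoob
              · exact Or.inr ⟨q, ⟨hm, hb2, hb3, hb4⟩, ha⟩
      · rw [if_neg (by push_neg; exact ⟨h1.1, h1.2⟩), if_neg h2]
        push_neg at h2
        have hinb : pvInB n c p := ⟨h2.1, h2.2.1, h2.2.2.1, h2.2.2.2⟩
        have hVadd : PySem.Set.add V p = V ++ [p] := PySem.Set.add_of_not_mem h1.2
        have hV' : (V ++ [p]).Nodup := by
          simp only [List.nodup_append, List.nodup_singleton, hV, true_and]
          intro a hab b hb
          simp only [List.mem_singleton] at hb
          subst hb
          exact fun he => h1.2 (he ▸ hab)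
        obtain ⟨m1, m2, m3, m4⟩ := ih (V ++ [p]) _ hndF hV'
        rw [hVadd] at *
        refine ⟨?_, ?_, m3, ?_⟩
        · intro x
          rw [m1 x]
          constructor
          · rintro (h | ⟨hm, hb2, hb3, hb4⟩)
            · rcases List.mem_append.mp h with h | h
              · exact Or.inl h
              · have : x = p := by simpa using h
                subst this
                exact Or.inr ⟨List.mem_cons_self, h1.1, h1.2, hinb⟩
            · refine Or.inr ⟨List.mem_cons_of_mem _ hm, hb2, fun hx => hb3 (List.mem_append.mpr (Or.inl hx)), hb4⟩
          · rintro (h | ⟨hm, hb2, hb3, hb4⟩)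
            · exact Or.inl (List.mem_append.mpr (Or.inl h))
            · rcases List.mem_cons.mp hm with rfl | hm
              · exact Or.inl (List.mem_append.mpr (Or.inr List.mem_cons_self))
              · have hxp : x ≠ p := fun hxp => hpF (hxp ▸ hm)
                refine Or.inr ⟨hm, hb2, ?_, hb4⟩
                intro hx
                rcases List.mem_append.mp hx with hx | hx
                · exact hb3 hx
                · exact hxp (by simpa using hx)
        · intro x
          rw [m2 x]
          have hWadd : ∀ y, y ∈ (PySem.Set.add (PySem.Set.add (PySem.Set.add (PySem.Set.add W (p.1 + 1, p.2))
              (p.1, p.2 + 1)) (p.1 - 1, p.2)) (p.1, p.2 - 1)) ↔ y ∈ W ∨ pvAdj p y := by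
            intro y
            simp only [PySem.Set.mem_add, pvAdj]
            tauto
          constructor
          · rintro (h | ⟨q, ⟨hm, hb2, hb3, hb4⟩, ha⟩)
            · rcases (hWadd x).mp h with h | h
              · exact Or.inl h
              · exact Or.inr ⟨p, ⟨List.mem_cons_self, h1.1, h1.2, hinb⟩, h⟩
            · exact Or.inr ⟨q, ⟨List.mem_cons_of_mem _ hm, hb2,
                fun hx => hb3 (List.mem_append.mpr (Or.inl hx)), hb4⟩, ha⟩
          · rintro (h | ⟨q, ⟨hm, hb2, hb3, hb4⟩, ha⟩)
            · exact Or.inl ((hWadd x).mpr (Or.inl h))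
            · rcases List.mem_cons.mp hm with rfl | hm
              · exact Or.inl ((hWadd x).mpr (Or.inr ha))
              · have hqp : q ≠ p := fun hqp => hpF (hqp ▸ hm)
                refine Or.inr ⟨q, ⟨hm, hb2, ?_, hb4⟩, ha⟩
                intro hx
                rcases List.mem_append.mp hx with hx | hx
                · exact hb3 hx
                · exact hqp (by simpa using hx)
        · rcases m4 with h | h
          · right
            rw [h]
            simp
          · right
            have : (V ++ [p]).length = V.length + 1 := by simp
            omega

def pvFree (n c : Int) (blk : List (Int × Int)) (p : Int × Int) : Prop :=
  pvInB n c p ∧ p ∉ blk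

inductive pvConn (n c : Int) (blk : List (Int × Int)) : (Int × Int) → (Int × Int) → Prop
  | refl (a : Int × Int) : pvFree n c blk a → pvConn n c blk a a
  | tail {a p q : Int × Int} : pvConn n c blk a p → pvFree n c blk q → pvAdj p q →
      pvConn n c blk a q

theorem pvAdj_symm {p q : Int × Int} (h : pvAdj p q) : pvAdj q p := by
  obtain ⟨a, b⟩ := p; obtain ⟨x, y⟩ := q
  simp only [pvAdj, Prod.mk.injEq] at h ⊢
  omega

theorem pvConn_free_left {n c : Int} {blk : List (Int × Int)} {a b : Int × Int}
    (h : pvConn n c blk a b) : pvFree n c blk a := by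
  induction h with
  | refl h => exact h
  | tail _ _ _ ih => exact ih

theorem pvConn_free_right {n c : Int} {blk : List (Int × Int)} {a b : Int × Int}
    (h : pvConn n c blk a b) : pvFree n c blk b := by
  induction h with
  | refl h => exact h
  | tail _ hf _ _ => exact hf

theorem pvConn_trans {n c : Int} {blk : List (Int × Int)} {a b d : Int × Int}
    (h1 : pvConn n c blk a b) (h2 : pvConn n c blk b d) : pvConn n c blk a d := by
  induction h2 with
  | refl _ => exact h1
  | tail _ hf ha ih => exact pvConn.tail ih hf ha

theorem pvConn_symm {n c : Int} {blk : List (Int × Int)} {a b : Int × Int}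
    (h : pvConn n c blk a b) : pvConn n c blk b a := by
  induction h with
  | refl h => exact pvConn.refl _ h
  | tail hconn hf ha ih =>
    exact pvConn_trans
      (pvConn.tail (pvConn.refl _ hf) (pvConn_free_right hconn) (pvAdj_symm ha)) ih

theorem pv_oob_unique {n c : Int} {x p q : Int × Int} (hx : ¬ pvInB n c x)
    (hp : pvInB n c p) (hq : pvInB n c q) (hap : pvAdj p x) (haq : pvAdj q x) : p = q := by
  obtain ⟨a, b⟩ := p; obtain ⟨e, f⟩ := q; obtain ⟨u, v⟩ := x
  simp only [pvAdj, pvInB, Prod.mk.injEq, not_and, not_lt] at *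
  omega

theorem pv_card_bound {n c : Int} {V : List (Int × Int)} (hnd : V.Nodup)
    (hin : ∀ p ∈ V, pvInB n c p) : V.length ≤ n.toNat * c.toNat := by
  classical
  have h1 : V.toFinset.card = V.length := List.toFinset_card_of_nodup hnd
  have h2 : V.toFinset ⊆ (Finset.Ico (0:Int) n) ×ˢ (Finset.Ico (0:Int) c) := by
    intro p hp
    have := hin p (List.mem_toFinset.mp hp)
    simp only [Finset.mem_product, Finset.mem_Ico]
    exact ⟨⟨this.1, this.2.1⟩, ⟨this.2.2.1, this.2.2.2⟩⟩
  have h3 := Finset.card_le_card h2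
  simp only [Finset.card_product, Int.card_Ico, Int.sub_zero] at h3
  omega

-- the invariant of A's bidirectional loop: V splits into a side reached from a (SF) and a side
-- reached from b (SB); each side's free boundary lies in V or its frontier; the sides never touch

structure pvBInv (n c : Int) (blk : List (Int × Int)) (SF SB : (Int × Int) → Prop)
    (F B V : List (Int × Int)) (a b : Int × Int) : Prop where
  vIff : ∀ x, x ∈ V ↔ SF x ∨ SB x
  sfReach : ∀ x, SF x → pvConn n c blk a x
  sbReach : ∀ x, SB x → pvConn n c blk b x
  sfClosed : ∀ p x, SF p → pvFree n c blk x → pvAdj p x → x ∈ V ∨ x ∈ F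
  sbClosed : ∀ p x, SB p → pvFree n c blk x → pvAdj p x → x ∈ V ∨ x ∈ B
  aIn : SF a ∨ a ∈ F
  bIn : SB b ∨ b ∈ B
  aNot : ¬ SB a
  bNot : ¬ SF b
  sep : ∀ p q, SF p → SB q → ¬ pvAdj p q
  attF : ∀ x ∈ F, x = a ∨ ∃ p, pvConn n c blk a p ∧ pvAdj p x
  attB : ∀ x ∈ B, x = b ∨ ∃ p, pvConn n c blk b p ∧ pvAdj p x

theorem pvBInv_swap {n c : Int} {blk : List (Int × Int)} {SF SB : (Int × Int) → Prop}
    {F B V : List (Int × Int)} {a b : Int × Int} (h : pvBInv n c blk SF SB F B V a b) :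
    pvBInv n c blk SB SF B F V b a where
  vIff x := (h.vIff x).trans or_comm
  sfReach := h.sbReach
  sbReach := h.sfReach
  sfClosed := h.sbClosed
  sbClosed := h.sfClosed
  aIn := h.bIn
  bIn := h.aIn
  aNot := h.bNot
  bNot := h.aNot
  sep p q hp hq hadj := h.sep q p hq hp (pvAdj_symm hadj)
  attF := h.attB
  attB := h.attF

-- if one frontier is empty, the two searched regions can no longer be joined

theorem pvDeath {n c : Int} {blk : List (Int × Int)} {SF SB : (Int × Int) → Prop}
    {B V : List (Int × Int)} {a b : Int × Int} (inv : pvBInv n c blk SF SB [] B V a b)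
    (hc : pvConn n c blk a b) : False := by
  have hSFa : SF a := by
    rcases inv.aIn with h | h
    · exact h
    · simp at h
  have hall : ∀ x, pvConn n c blk a x → SF x := by
    intro x hx
    induction hx with
    | refl _ => exact hSFa
    | tail hconn hf hadj ih =>
      rename_i p q
      rcases inv.sfClosed p q ih hf hadj with hv | hv
      · rcases (inv.vIff q).mp hv with h | h
        · exact h
        · exact absurd hadj (inv.sep p q ih h)
      · simp at hv
  exact inv.bNot (hall b hc)

-- a cell in both frontiers and not blocked witnesses a connection

theorem pvMeet {n c : Int} {blk : List (Int × Int)} {SF SB : (Int × Int) → Prop}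
    {F B V : List (Int × Int)} {a b x : Int × Int} (inv : pvBInv n c blk SF SB F B V a b)
    (hfa : pvFree n c blk a) (hfb : pvFree n c blk b)
    (hxF : x ∈ F) (hxB : x ∈ B) (hxblk : x ∉ blk) : pvConn n c blk a b := by
  by_cases hin : pvInB n c x
  · have hfx : pvFree n c blk x := ⟨hin, hxblk⟩
    have hax : pvConn n c blk a x := by
      rcases inv.attF x hxF with rfl | ⟨p, hp, hadj⟩
      · exact pvConn.refl _ hfx
      · exact pvConn.tail hp hfx hadj
    have hbx : pvConn n c blk b x := by
      rcases inv.attB x hxB with rfl | ⟨p, hp, hadj⟩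
      · exact pvConn.refl _ hfx
      · exact pvConn.tail hp hfx hadj
    exact pvConn_trans hax (pvConn_symm hbx)
  · rcases inv.attF x hxF with rfl | ⟨p, hp, hadjp⟩
    · exact absurd hfa.1 hin
    · rcases inv.attB x hxB with rfl | ⟨q, hq, hadjq⟩
      · exact absurd hfb.1 hin
      · have hpq : p = q :=
          pv_oob_unique hin (pvConn_free_right hp).1 (pvConn_free_right hq).1 hadjp hadjq
        exact pvConn_trans hp (hpq ▸ pvConn_symm hq)

theorem pvBfsA_nil_left (n c : Int) (blk : PySem.Set (Int × Int)) (f : Nat)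
    (B V : PySem.Set (Int × Int)) : pvBfsA n c blk f [] B V = false := by
  cases f with
  | zero => rfl
  | succ f => rw [pvBfsA, if_pos (Or.inl rfl)]

-- second component of the expansion fold stays duplicate-free

theorem pvStep_snd_nodup (n c : Int) (blk : List (Int × Int)) :
    ∀ (F : List (Int × Int)) (V W : List (Int × Int)), W.Nodup →
    (F.foldl
      (fun st p =>
        if p ∈ blk ∨ p ∈ st.1 then st
        else if p.1 < 0 ∨ n ≤ p.1 ∨ p.2 < 0 ∨ c ≤ p.2 then st
        else (PySem.Set.add st.1 p,
          PySem.Set.add (PySem.Set.add (PySem.Set.add (PySem.Set.add st.2 (p.1 + 1, p.2))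
            (p.1, p.2 + 1)) (p.1 - 1, p.2)) (p.1, p.2 - 1)))
      (V, W)).2.Nodup := by
  intro F
  induction F with
  | nil => intro V W h; exact h
  | cons p F ih =>
    intro V W hW
    simp only [List.foldl_cons]
    by_cases h1 : p ∈ blk ∨ p ∈ V
    · rw [if_pos h1]; exact ih V W hW
    · rw [if_neg h1]
      by_cases h2 : p.1 < 0 ∨ n ≤ p.1 ∨ p.2 < 0 ∨ c ≤ p.2
      · rw [if_pos h2]; exact ih V W hW
      · rw [if_neg h2]
        exact ih _ _ (PySem.Set.nodup_add _ _ (PySem.Set.nodup_add _ _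
          (PySem.Set.nodup_add _ _ (PySem.Set.nodup_add _ _ hW))))

-- one expansion step preserves the invariant (stated for the already-oriented expanding side)

theorem pvExpandInv (n c : Int) (blk : List (Int × Int)) (X Y V : List (Int × Int))
    (a b : Int × Int) (SX SY : (Int × Int) → Prop)
    (hfa : pvFree n c blk a) (hfb : pvFree n c blk b)
    (hndX : X.Nodup) (hndV : V.Nodup)
    (hno : ∀ x, x ∈ X → x ∈ Y → x ∈ blk)
    (inv : pvBInv n c blk SX SY X Y V a b) :
    pvBInv n c blk (fun x => SX x ∨ pvNew n c blk V X x) SY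
      (pvStep n c blk X V).2 Y (pvStep n c blk X V).1 a b := by
  obtain ⟨m1, m2, m3, m4⟩ := pvStep_go n c blk X V [] hndX hndV
  rw [← pvStep_eq] at m1 m2 m3 m4
  have hNfc : ∀ x, pvNew n c blk V X x → pvFree n c blk x ∧ pvConn n c blk a x := by
    intro x hx
    obtain ⟨hxX, hxblk, hxV, hxin⟩ := hx
    have hfx : pvFree n c blk x := ⟨hxin, hxblk⟩
    refine ⟨hfx, ?_⟩
    rcases inv.attF x hxX with rfl | ⟨p, hp, hadj⟩
    · exact pvConn.refl _ hfx
    · exact pvConn.tail hp hfx hadj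
  have hm2' : ∀ x, x ∈ (pvStep n c blk X V).2 ↔ ∃ p, pvNew n c blk V X p ∧ pvAdj p x := by
    intro x
    rw [m2 x]
    simp
  have hm1' : ∀ x, x ∈ (pvStep n c blk X V).1 ↔ x ∈ V ∨ pvNew n c blk V X x := m1
  refine ⟨?_, ?_, inv.sbReach, ?_, ?_, ?_, ?_, inv.aNot, ?_, ?_, ?_, inv.attB⟩
  · intro x
    rw [hm1' x, inv.vIff x]
    tauto
  · intro x hx
    rcases hx with hx | hx
    · exact inv.sfReach x hx
    · exact (hNfc x hx).2
  · -- sfClosed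
    intro p x hp hfx hadj
    rcases hp with hp | hp
    · rcases inv.sfClosed p x hp hfx hadj with hv | hv
      · exact Or.inl ((hm1' x).mpr (Or.inl hv))
      · by_cases hxV : x ∈ V
        · exact Or.inl ((hm1' x).mpr (Or.inl hxV))
        · exact Or.inl ((hm1' x).mpr (Or.inr ⟨hv, hfx.2, hxV, hfx.1⟩))
    · exact Or.inr ((hm2' x).mpr ⟨p, hp, hadj⟩)
  · -- sbClosed
    intro p x hp hfx hadj
    rcases inv.sbClosed p x hp hfx hadj with hv | hv
    · exact Or.inl ((hm1' x).mpr (Or.inl hv))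
    · exact Or.inr hv
  · -- aIn
    rcases inv.aIn with h | h
    · exact Or.inl (Or.inl h)
    · by_cases haV : a ∈ V
      · rcases (inv.vIff a).mp haV with h' | h'
        · exact Or.inl (Or.inl h')
        · exact absurd h' inv.aNot
      · exact Or.inl (Or.inr ⟨h, hfa.2, haV, hfa.1⟩)
  · exact inv.bIn
  · -- bNot
    rintro (h | h)
    · exact inv.bNot h
    · obtain ⟨hbX, hbblk, hbV, _⟩ := h
      have hbY : b ∈ Y := by
        rcases inv.bIn with h' | h'
        · exact absurd ((inv.vIff b).mpr (Or.inr h')) hbV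
        · exact h'
      exact hbblk (hno b hbX hbY)
  · -- sep
    rintro p q (hp | hp) hq hadj
    · exact inv.sep p q hp hq hadj
    · obtain ⟨hpX, hpblk, hpV, hpin⟩ := hp
      rcases inv.sbClosed q p hq ⟨hpin, hpblk⟩ (pvAdj_symm hadj) with hv | hv
      · exact hpV hv
      · exact hpblk (hno p hpX hv)
  · -- attF
    intro x hx
    rcases (hm2' x).mp hx with ⟨p, hp, hadj⟩
    exact Or.inr ⟨p, (hNfc p hp).2, hadj⟩

theorem pvBfs_master (n c : Int) (blk : List (Int × Int)) :
    ∀ (fuel : Nat) (F B V : List (Int × Int)) (a b : Int × Int) (SF SB : (Int × Int) → Prop),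
    pvFree n c blk a → pvFree n c blk b →
    F.Nodup → B.Nodup → V.Nodup → (∀ x ∈ V, pvInB n c x) →
    n.toNat * c.toNat + 2 ≤ fuel + V.length →
    pvBInv n c blk SF SB F B V a b →
    (pvBfsA n c blk fuel F B V = true ↔ pvConn n c blk a b) := by
  intro fuel
  induction fuel with
  | zero =>
    intro F B V a b SF SB _ _ _ _ hndV hinV hfuel _
    have := pv_card_bound hndV hinV
    omega
  | succ fuel ih =>
    intro F B V a b SF SB hfa hfb hndF hndB hndV hinV hfuel inv
    by_cases hFB : F = [] ∨ B = []
    · rw [pvBfsA, if_pos hFB]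
      simp only [Bool.false_eq_true, false_iff]
      intro hc
      rcases hFB with rfl | rfl
      · exact pvDeath inv hc
      · exact pvDeath (pvBInv_swap inv) (pvConn_symm hc)
    · by_cases hov : PySem.Set.inter F (PySem.Set.diff B blk) ≠ []
      · rw [pvBfsA, if_neg hFB, if_pos hov]
        simp only [true_iff]
        obtain ⟨x, hx⟩ := List.exists_mem_of_ne_nil _ hov
        rw [PySem.Set.mem_inter] at hx
        rw [PySem.Set.mem_diff] at hx
        exact pvMeet inv hfa hfb hx.1 hx.2.1 hx.2.2
      · have hemp : PySem.Set.inter F (PySem.Set.diff B blk) = [] := by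
          by_contra h; exact hov h
        have hno : ∀ x, x ∈ F → x ∈ B → x ∈ blk := by
          intro x hxF hxB
          by_contra hxblk
          have : x ∈ PySem.Set.inter F (PySem.Set.diff B blk) :=
            (PySem.Set.mem_inter _ _ _).mpr ⟨hxF, (PySem.Set.mem_diff _ _ _).mpr ⟨hxB, hxblk⟩⟩
          rw [hemp] at this
          simp at this
        rw [pvBfsA, if_neg hFB, if_neg hov]
        have key : ∀ (X Y : List (Int × Int)) (a' b' : Int × Int)
            (SX SY : (Int × Int) → Prop), pvFree n c blk a' → pvFree n c blk b' →
            X.Nodup → Y.Nodup → (∀ x, x ∈ X → x ∈ Y → x ∈ blk) →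
            pvBInv n c blk SX SY X Y V a' b' →
            (pvBfsA n c blk fuel (pvStep n c blk X V).2 Y (pvStep n c blk X V).1 = true ↔
              pvConn n c blk a' b') := by
          intro X Y a' b' SX SY hfa' hfb' hndX hndY hno' inv'
          obtain ⟨m1, m2, m3, m4⟩ := pvStep_go n c blk X V [] hndX hndV
          rw [← pvStep_eq] at m1 m2 m3 m4
          have hinv2 := pvExpandInv n c blk X Y V a' b' SX SY hfa' hfb' hndX hndV hno' inv'
          have hin1 : ∀ x ∈ (pvStep n c blk X V).1, pvInB n c x := by
            intro x hx
            rcases (m1 x).mp hx with h | h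
            · exact hinV x h
            · exact h.2.2.2
          rcases m4 with heq | hlt
          · have h1 : (pvStep n c blk X V).1 = V := congrArg Prod.fst heq
            have h2 : (pvStep n c blk X V).2 = [] := congrArg Prod.snd heq
            rw [h2, pvBfsA_nil_left]
            simp only [Bool.false_eq_true, false_iff]
            intro hc
            rw [h2] at hinv2
            exact pvDeath hinv2 hc
          · exact ih (pvStep n c blk X V).2 Y (pvStep n c blk X V).1 a' b' _ SY hfa' hfb'
              (by rw [pvStep_eq]; exact pvStep_snd_nodup n c blk X V [] List.nodup_nil) hndY m3 hin1
              (by omega) hinv2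
        by_cases hsw : PySem.Set.len F > PySem.Set.len B
        · rw [if_pos hsw]
          have := key B F b a SB SF hfb hfa hndB hndF (fun x hB hF => hno x hF hB)
            (pvBInv_swap inv)
          rw [this]
          exact ⟨pvConn_symm, pvConn_symm⟩
        · rw [if_neg hsw]
          exact key F B a b SF SB hfa hfb hndF hndB hno inv

structure pvDInv (h w : Int) (blk : List (Int × Int)) (stack seen : List (Int × Int))
    (a : Int × Int) : Prop where
  reach : ∀ x ∈ seen, pvConn h w blk a x
  closed : ∀ p ∈ seen, ∀ x, pvFree h w blk x → pvAdj p x → x ∈ seen ∨ x ∈ stack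
  aIn : a ∈ seen ∨ a ∈ stack
  att : ∀ x ∈ stack, x = a ∨ ∃ p, pvConn h w blk a p ∧ pvAdj p x

theorem pvDfs_master (h w : Int) (blk : List (Int × Int)) :
    ∀ (fuel : Nat) (stack seen : List (Int × Int)) (a : Int × Int),
    pvFree h w blk a → seen.Nodup → (∀ x ∈ seen, pvInB h w x) →
    5 * (h.toNat * w.toNat) + stack.length + 1 ≤ fuel + 5 * seen.length →
    pvDInv h w blk stack seen a →
    ∀ x, (x ∈ pvDfsB h w blk fuel stack seen ↔ x ∈ seen ∨ pvConn h w blk a x) := by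
  intro fuel
  induction fuel with
  | zero =>
    intro stack seen a _ hnd hin hfuel _
    have := pv_card_bound hnd hin
    omega
  | succ fuel ih =>
    intro stack seen a hfa hnd hin hfuel inv
    cases stack with
    | nil =>
      intro x
      rw [pvDfsB]
      have haseen : a ∈ seen := by
        rcases inv.aIn with h' | h'
        · exact h'
        · simp at h'
      have hall : ∀ y, pvConn h w blk a y → y ∈ seen := by
        intro y hy
        induction hy with
        | refl _ => exact haseen
        | tail hconn hf hadj ihy =>
          rename_i p q
          rcases inv.closed p ihy q hf hadj with h' | h'
          · exact h'
          · simp at h'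
      constructor
      · exact Or.inl
      · rintro (h' | h')
        · exact h'
        · exact hall x h'
    | cons p rest =>
      rw [pvDfsB]
      by_cases hskip : p ∈ seen ∨ p ∈ blk ∨ ¬(0 ≤ p.1 ∧ p.1 < h ∧ 0 ≤ p.2 ∧ p.2 < w)
      · rw [if_pos hskip]
        have hinv' : pvDInv h w blk rest seen a := by
          refine ⟨inv.reach, ?_, ?_, fun x hx => inv.att x (List.mem_cons_of_mem _ hx)⟩
          · intro q hq x hfx hadj
            rcases inv.closed q hq x hfx hadj with h' | h'
            · exact Or.inl h'
            · rcases List.mem_cons.mp h' with rfl | h'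
              · rcases hskip with h'' | h'' | h''
                · exact Or.inl h''
                · exact absurd h'' hfx.2
                · exact absurd ⟨hfx.1.1, hfx.1.2.1, hfx.1.2.2.1, hfx.1.2.2.2⟩ h''
              · exact Or.inr h'
          · rcases inv.aIn with h' | h'
            · exact Or.inl h'
            · rcases List.mem_cons.mp h' with rfl | h'
              · rcases hskip with h'' | h'' | h''
                · exact Or.inl h''
                · exact absurd h'' hfa.2
                · exact absurd ⟨hfa.1.1, hfa.1.2.1, hfa.1.2.2.1, hfa.1.2.2.2⟩ h''
              · exact Or.inr h'
        exact ih rest seen a hfa hnd hin (by simp at hfuel ⊢; omega) hinv'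
      · rw [if_neg hskip]
        push_neg at hskip
        obtain ⟨hps, hpb, hpin⟩ := hskip
        have hpinb : pvInB h w p := ⟨hpin.1, hpin.2.1, hpin.2.2.1, hpin.2.2.2⟩
        have hfp : pvFree h w blk p := ⟨hpinb, hpb⟩
        have hconnp : pvConn h w blk a p := by
          rcases inv.att p List.mem_cons_self with rfl | ⟨q, hq, hadj⟩
          · exact pvConn.refl _ hfp
          · exact pvConn.tail hq hfp hadj
        have hadd : PySem.Set.add seen p = seen ++ [p] := PySem.Set.add_of_not_mem hps
        have hnd' : (seen ++ [p]).Nodup := by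
          simp only [List.nodup_append, List.nodup_singleton, hnd, true_and]
          intro x hx y hy
          simp only [List.mem_singleton] at hy
          subst hy
          exact fun he => hps (he ▸ hx)
        have hin' : ∀ x ∈ seen ++ [p], pvInB h w x := by
          intro x hx
          rcases List.mem_append.mp hx with hx | hx
          · exact hin x hx
          · have : x = p := by simpa using hx
            exact this ▸ hpinb
        have hadjmem : ∀ x, pvAdj p x →
            x ∈ (p.1, p.2 + 1) :: (p.1, p.2 - 1) :: (p.1 + 1, p.2) :: (p.1 - 1, p.2) :: rest := by
          intro x hx
          rcases hx with rfl | rfl | rfl | rfl <;> simp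
        have hinv' : pvDInv h w blk
            ((p.1, p.2 + 1) :: (p.1, p.2 - 1) :: (p.1 + 1, p.2) :: (p.1 - 1, p.2) :: rest)
            (seen ++ [p]) a := by
          refine ⟨?_, ?_, ?_, ?_⟩
          · intro x hx
            rcases List.mem_append.mp hx with hx | hx
            · exact inv.reach x hx
            · have : x = p := by simpa using hx
              exact this ▸ hconnp
          · intro q hq x hfx hadj
            rcases List.mem_append.mp hq with hq | hq
            · rcases inv.closed q hq x hfx hadj with h' | h'
              · exact Or.inl (List.mem_append.mpr (Or.inl h'))
              · rcases List.mem_cons.mp h' with rfl | h'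
                · exact Or.inl (List.mem_append.mpr (Or.inr List.mem_cons_self))
                · exact Or.inr (by simp [h'])
            · have : q = p := by simpa using hq
              subst this
              exact Or.inr (hadjmem x hadj)
          · rcases inv.aIn with h' | h'
            · exact Or.inl (List.mem_append.mpr (Or.inl h'))
            · rcases List.mem_cons.mp h' with rfl | h'
              · exact Or.inl (List.mem_append.mpr (Or.inr List.mem_cons_self))
              · exact Or.inr (by simp [h'])
          · intro x hx
            rcases List.mem_cons.mp hx with rfl | hx
            · exact Or.inr ⟨p, hconnp, Or.inr (Or.inl rfl)⟩
            · rcases List.mem_cons.mp hx with rfl | hx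
              · exact Or.inr ⟨p, hconnp, Or.inr (Or.inr (Or.inr rfl))⟩
              · rcases List.mem_cons.mp hx with rfl | hx
                · exact Or.inr ⟨p, hconnp, Or.inl rfl⟩
                · rcases List.mem_cons.mp hx with rfl | hx
                  · exact Or.inr ⟨p, hconnp, Or.inr (Or.inr (Or.inl rfl))⟩
                  · exact inv.att x (List.mem_cons_of_mem _ hx)
        have hres := ih _ _ a hfa hnd' hin' (by simp at hfuel ⊢; omega) hinv'
        intro x
        rw [hadd, hres x]
        constructor
        · rintro (hx | hx)
          · rcases List.mem_append.mp hx with hx | hx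
            · exact Or.inl hx
            · have : x = p := by simpa using hx
              exact Or.inr (this ▸ hconnp)
          · exact Or.inr hx
        · rintro (hx | hx)
          · exact Or.inl (List.mem_append.mpr (Or.inl hx))
          · exact Or.inr hx

theorem pvBlockedA (n c : Int) (blk : List (Int × Int)) (s t : Int × Int)
    (hs : pvInB n c s) (hb : s ∈ blk ∨ t ∈ blk) (f : Nat) :
    pvBfsA n c blk (f + 3) [s] [t] [] = false := by
  have hnil : ¬(([s] : List (Int × Int)) = [] ∨ ([t] : List (Int × Int)) = []) := by simp
  have hlen11 : ¬(PySem.Set.len [s] > PySem.Set.len [t]) := by simp [PySem.Set.len]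
  by_cases hsb : s ∈ blk
  · have hov : PySem.Set.inter [s] (PySem.Set.diff [t] blk) = [] := by
      refine List.eq_nil_iff_forall_not_mem.mpr ?_
      intro x hx
      rw [PySem.Set.mem_inter] at hx
      rw [PySem.Set.mem_diff] at hx
      obtain ⟨hx1, _, hx3⟩ := hx
      have : x = s := by simpa using hx1
      exact hx3 (this ▸ hsb)
    have hstep : pvStep n c blk [s] [] = ([], []) := by
      rw [pvStep_eq]
      simp only [List.foldl_cons, List.foldl_nil]
      rw [if_pos (Or.inl hsb)]
    rw [pvBfsA, if_neg hnil, if_neg (by simp [hov]), if_neg hlen11]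
    show pvBfsA n c blk (f + 2) (pvStep n c blk [s] []).2 [t] (pvStep n c blk [s] []).1 = false
    rw [hstep]
    exact pvBfsA_nil_left n c blk (f + 2) [t] []
  · rcases hb with hb | htb
    · exact absurd hb hsb
    · have hov : PySem.Set.inter [s] (PySem.Set.diff [t] blk) = [] := by
        refine List.eq_nil_iff_forall_not_mem.mpr ?_
        intro x hx
        rw [PySem.Set.mem_inter] at hx
        rw [PySem.Set.mem_diff] at hx
        obtain ⟨_, hx2, hx3⟩ := hx
        have : x = t := by simpa using hx2
        exact hx3 (this ▸ htb)
      have hne1 : ((s.1 : Int), s.2 + 1) ≠ (s.1 + 1, s.2) := by simp [Prod.ext_iff]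
      have hne2 : ((s.1 : Int) - 1, s.2) ≠ (s.1 + 1, s.2) := by simp [Prod.ext_iff]; omega
      have hne3 : ((s.1 : Int) - 1, s.2) ≠ (s.1, s.2 + 1) := by simp [Prod.ext_iff]
      have hne4 : ((s.1 : Int), s.2 - 1) ≠ (s.1 + 1, s.2) := by simp [Prod.ext_iff]
      have hne5 : ((s.1 : Int), s.2 - 1) ≠ (s.1, s.2 + 1) := by simp [Prod.ext_iff]; omega
      have hne6 : ((s.1 : Int), s.2 - 1) ≠ (s.1 - 1, s.2) := by simp [Prod.ext_iff]
      have hstep1 : pvStep n c blk [s] [] =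
          ([s], [(s.1 + 1, s.2), (s.1, s.2 + 1), (s.1 - 1, s.2), (s.1, s.2 - 1)]) := by
        rw [pvStep_eq]
        simp only [List.foldl_cons, List.foldl_nil]
        rw [if_neg (by simp [hsb]), if_neg (by
          simp only [not_or, not_lt, not_le]
          exact ⟨hs.1, hs.2.1, hs.2.2.1, hs.2.2.2⟩)]
        simp [PySem.Set.add_of_not_mem, hne1, hne2, hne3, hne4, hne5, hne6]
      rw [pvBfsA, if_neg hnil, if_neg (by simp [hov]), if_neg hlen11]
      show pvBfsA n c blk (f + 2) (pvStep n c blk [s] []).2 [t] (pvStep n c blk [s] []).1 = false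
      rw [hstep1]
      have hov2 : PySem.Set.inter [(s.1 + 1, s.2), (s.1, s.2 + 1), (s.1 - 1, s.2), (s.1, s.2 - 1)]
          (PySem.Set.diff [t] blk) = [] := by
        refine List.eq_nil_iff_forall_not_mem.mpr ?_
        intro x hx
        rw [PySem.Set.mem_inter] at hx
        rw [PySem.Set.mem_diff] at hx
        obtain ⟨_, hx2, hx3⟩ := hx
        have : x = t := by simpa using hx2
        exact hx3 (this ▸ htb)
      have hlen41 : PySem.Set.len [(s.1 + 1, s.2), (s.1, s.2 + 1), (s.1 - 1, s.2), (s.1, s.2 - 1)] >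
          PySem.Set.len [t] := by simp [PySem.Set.len]
      have hstep2 : pvStep n c blk [t] [s] = ([s], []) := by
        rw [pvStep_eq]
        simp only [List.foldl_cons, List.foldl_nil]
        rw [if_pos (Or.inl htb)]
      rw [pvBfsA, if_neg (by simp), if_neg (by simp [hov2]), if_pos hlen41]
      show pvBfsA n c blk (f + 1) (pvStep n c blk [t] [s]).2
        [(s.1 + 1, s.2), (s.1, s.2 + 1), (s.1 - 1, s.2), (s.1, s.2 - 1)]
        (pvStep n c blk [t] [s]).1 = false
      rw [hstep2]
      exact pvBfsA_nil_left n c blk (f + 1) _ _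

theorem pvBfsA_char (n c : Int) (blk : List (Int × Int)) (s t : Int × Int)
    (hn : 0 < n) (hcpos : 0 < c) (hs : pvInB n c s) (ht : pvInB n c t) :
    (pvBfsA n c blk (n.toNat * c.toNat + 2) [s] [t] [] = true ↔ pvConn n c blk s t) := by
  have hcap : 1 ≤ n.toNat * c.toNat := by
    have h1 : 0 < n.toNat := by omega
    have h2 : 0 < c.toNat := by omega
    exact Nat.mul_pos h1 h2
  by_cases hb : s ∈ blk ∨ t ∈ blk
  · obtain ⟨f, hf⟩ : ∃ f, n.toNat * c.toNat + 2 = f + 3 := ⟨n.toNat * c.toNat - 1, by omega⟩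
    rw [hf, pvBlockedA n c blk s t hs hb f]
    simp only [Bool.false_eq_true, false_iff]
    intro hcn
    rcases hb with hb | hb
    · exact (pvConn_free_left hcn).2 hb
    · exact (pvConn_free_right hcn).2 hb
  · push_neg at hb
    have hfs : pvFree n c blk s := ⟨hs, hb.1⟩
    have hft : pvFree n c blk t := ⟨ht, hb.2⟩
    have inv0 : pvBInv n c blk (fun _ => False) (fun _ => False) [s] [t] [] s t := by
      refine ⟨by simp, by simp, by simp, by simp, by simp, by simp, by simp, by simp, by simp,
        by simp, ?_, ?_⟩
      · intro x hx
        have : x = s := by simpa using hx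
        exact Or.inl this
      · intro x hx
        have : x = t := by simpa using hx
        exact Or.inl this
    exact pvBfs_master n c blk (n.toNat * c.toNat + 2) [s] [t] [] s t
      (fun _ => False) (fun _ => False) hfs hft (List.nodup_singleton s)
      (List.nodup_singleton t) List.nodup_nil (by simp) (by simp) inv0

theorem pvDfs_char (h w : Int) (blk : List (Int × Int)) (s t : Int × Int)
    (hfs : pvFree h w blk s) :
    (t ∈ pvDfsB h w blk (5 * (h.toNat * w.toNat) + 6) [s] [] ↔ pvConn h w blk s t) := by
  have inv0 : pvDInv h w blk [s] [] s := by
    refine ⟨by simp, by simp, Or.inr (by simp), ?_⟩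
    intro x hx
    have : x = s := by simpa using hx
    exact Or.inl this
  have := pvDfs_master h w blk (5 * (h.toNat * w.toNat) + 6) [s] [] s hfs List.nodup_nil
    (by simp) (by simp) inv0 t
  simpa using this

-- ==== compression ====

def pvPosT (pp u : Int) : List Int → List Int
  | [] => []
  | v :: vs => (pp + min (v - u) 2) :: pvPosT (pp + min (v - u) 2) v vs

theorem pvLast_getD (xs : List Int) (x : Int) : PySem.List.pyGetD (xs ++ [x]) (-1) 0 = x := by
  simp [PySem.List.pyGetD, PySem.List.pyGet?, PySem.List.pyIdx?]

theorem pvLast_cons (l : List Int) (a : Int) :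
    PySem.List.pyGetD (a :: l) (-1) 0 = l.getLastD a := by
  induction l generalizing a with
  | nil => simp [PySem.List.pyGetD, PySem.List.pyGet?, PySem.List.pyIdx?]
  | cons b bs ih =>
    have h1 : a :: b :: bs = [a] ++ (b :: bs) := rfl
    rw [List.getLastD_cons]
    rw [← ih b]
    simp [PySem.List.pyGetD, PySem.List.pyGet?, PySem.List.pyIdx?, Nat.add_comm]
    rfl

theorem pvPosB_fold : ∀ (vs : List Int) (u : Int) (acc : List Int) (pp : Int),
    PySem.List.pyGetD acc (-1) 0 = pp →
    ((u :: vs).zip vs).foldl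
      (fun acc ab => acc ++ [PySem.List.pyGetD acc (-1) 0 + min (ab.2 - ab.1) 2]) acc
      = acc ++ pvPosT pp u vs := by
  intro vs
  induction vs with
  | nil => intro u acc pp _; simp [pvPosT]
  | cons v vs ih =>
    intro u acc pp hlast
    rw [List.zip_cons_cons, List.foldl_cons, hlast]
    rw [ih v (acc ++ [pp + min (v - u) 2]) (pp + min (v - u) 2) (pvLast_getD _ _)]
    simp [pvPosT]

theorem pvCompA_chain : ∀ (rest : List Int) (w : List Int) (k : Nat) (prev : Int)
    (d : PySem.Dict Int Int) (m : Int),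
    w.drop k = rest → 1 ≤ k → w[k - 1]? = some prev → List.Pairwise (· < ·) (prev :: rest) →
    (PySem.List.enumerate rest (k : Int)).foldl
      (fun st iv =>
        let n : Int :=
          if iv.1 ≠ 0 ∧ PySem.List.pyGetD w (iv.1 - 1) 0 ≠ iv.2 - 1 then st.2 + 1 else st.2
        (st.1.insert iv.2 n, n + 1))
      (d, m)
      = ((rest.zip (pvPosT (m - 1) prev rest)).foldl (fun d p => d.insert p.1 p.2) d,
         (pvPosT (m - 1) prev rest).getLastD (m - 1) + 1) := by
  intro rest
  induction rest with
  | nil =>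
    intro w k prev d m _ _ _ _
    simp [PySem.List.enumerate_nil, pvPosT]
  | cons v vs ih =>
    intro w k prev d m hdrop hk hget hch
    have hpv : prev < v := (List.pairwise_cons.mp hch).1 v List.mem_cons_self
    have hchv : List.Pairwise (· < ·) (v :: vs) := (List.pairwise_cons.mp hch).2
    rw [PySem.List.enumerate_cons, List.foldl_cons]
    have hk0 : (k : Int) ≠ 0 := by
      simp only [ne_eq, Int.natCast_eq_zero]
      omega
    have hprev : PySem.List.pyGetD w ((k : Int) - 1) 0 = prev := by
      rw [show ((k : Int) - 1) = ((k - 1 : Nat) : Int) by omega, PySem.List.pyGetD_natCast]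
      rw [List.getD_eq_getElem?_getD, hget]
      rfl
    have hn : (if (k : Int) ≠ 0 ∧ PySem.List.pyGetD w ((k : Int) - 1) 0 ≠ v - 1
        then m + 1 else m) = m - 1 + min (v - prev) 2 := by
      rw [hprev]
      by_cases hpv1 : prev = v - 1
      · rw [if_neg (by simp [hpv1])]
        omega
      · rw [if_pos ⟨hk0, hpv1⟩]
        omega
    simp only [hn]
    have hdrop' : w.drop (k + 1) = vs := by
      have : w.drop (k + 1) = (w.drop k).drop 1 := by
        rw [List.drop_drop, Nat.add_comm]
      rw [this, hdrop]
      rfl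
    have hget' : w[(k + 1) - 1]? = some v := by
      have h0 : (w.drop k)[0]? = some v := by rw [hdrop]; rfl
      rw [List.getElem?_drop] at h0
      simpa using h0
    have hthis := ih w (k + 1) v (d.insert v (m - 1 + min (v - prev) 2))
      (m - 1 + min (v - prev) 2 + 1) hdrop' (by omega) hget' hchv
    have harith : m - 1 + min (v - prev) 2 + 1 - 1 = m - 1 + min (v - prev) 2 := by ring
    rw [harith] at hthis
    rw [show ((k : Int) + 1) = ((k + 1 : Nat) : Int) by push_cast; ring, hthis]
    simp only [pvPosT, List.zip_cons_cons, List.foldl_cons, List.getLastD_cons]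

theorem pvCompA_spec (v0 : Int) (vs : List Int) (hch : List.Pairwise (· < ·) (v0 :: vs)) (start : Int) :
    pvCompressA (v0 :: vs) start =
      ((((v0 :: vs).zip (start :: pvPosT start v0 vs)).foldl
          (fun d p => d.insert p.1 p.2) PySem.Dict.empty),
       (pvPosT start v0 vs).getLastD start + 1) := by
  unfold pvCompressA
  rw [show ((PySem.List.enumerate (v0 :: vs) 0) = (0, v0) :: PySem.List.enumerate vs 1)
    from PySem.List.enumerate_cons _ _ _]
  rw [List.foldl_cons]
  simp only [ne_eq, not_true_eq_false, false_and, if_false, reduceIte]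
  have := pvCompA_chain vs (v0 :: vs) 1 v0 (PySem.Dict.empty.insert v0 start) (start + 1)
    (by rfl) (by omega) (by rfl) hch
  rw [show ((1 : Nat) : Int) = 1 from rfl] at this
  rw [show start + 1 - 1 = start by ring] at this
  rw [List.zip_cons_cons, List.foldl_cons]
  exact this

theorem pvCompB_spec (v0 : Int) (vs : List Int) :
    pvCompressB (v0 :: vs) =
      (PySem.Dict.ofList ((v0 :: vs).zip
          ((if v0 = 0 then 0 else 1) :: pvPosT (if v0 = 0 then 0 else 1) v0 vs)),
       if ((pvPosT (if v0 = 0 then 0 else 1) v0 vs).getLastD (if v0 = 0 then 0 else 1) + 1)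
           ≠ 10 ^ 6 + 1
       then (pvPosT (if v0 = 0 then 0 else 1) v0 vs).getLastD (if v0 = 0 then 0 else 1) + 1 + 1
       else (pvPosT (if v0 = 0 then 0 else 1) v0 vs).getLastD (if v0 = 0 then 0 else 1) + 1) := by
  simp only [pvCompressB, List.tail_cons, List.getD_cons_zero]
  rw [pvPosB_fold vs v0 [if v0 = 0 then 0 else 1] (if v0 = 0 then 0 else 1)
    (by rw [show ([if v0 = 0 then 0 else 1] : List Int) = [] ++ [if v0 = 0 then 0 else 1] from rfl,
      pvLast_getD])]
  rw [show ([if v0 = 0 then 0 else 1] ++ pvPosT (if v0 = 0 then 0 else 1) v0 vs : List Int)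
    = (if v0 = 0 then 0 else 1) :: pvPosT (if v0 = 0 then 0 else 1) v0 vs from rfl]
  rw [pvLast_cons]

theorem pvPosT_length : ∀ (vs : List Int) (pp u : Int), (pvPosT pp u vs).length = vs.length := by
  intro vs
  induction vs with
  | nil => intro pp u; rfl
  | cons v vs ih => intro pp u; simp [pvPosT, ih]

theorem pvGetLastD_mem (l : List Int) (d : Int) : l.getLastD d = d ∨ l.getLastD d ∈ l := by
  induction l generalizing d with
  | nil => exact Or.inl rfl
  | cons a as ih =>
    rw [List.getLastD_cons]
    rcases ih a with h | h
    · right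
      rw [h]
      exact List.mem_cons_self
    · exact Or.inr (List.mem_cons_of_mem _ h)

theorem pvPosT_bounds : ∀ (vs : List Int) (pp u : Int), List.Pairwise (· < ·) (u :: vs) →
    ∀ x ∈ pvPosT pp u vs, pp < x ∧ x ≤ (pvPosT pp u vs).getLastD pp := by
  intro vs
  induction vs with
  | nil => intro pp u _ x hx; simp [pvPosT] at hx
  | cons v vs ih =>
    intro pp u hch x hx
    have huv : u < v := (List.pairwise_cons.mp hch).1 v List.mem_cons_self
    have hch' : List.Pairwise (· < ·) (v :: vs) := (List.pairwise_cons.mp hch).2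
    simp only [pvPosT, List.mem_cons, List.getLastD_cons] at hx ⊢
    set n := pp + min (v - u) 2 with hn
    have hppn : pp < n := by omega
    have hlast : n ≤ (pvPosT n v vs).getLastD n := by
      rcases pvGetLastD_mem (pvPosT n v vs) n with h | h
      · omega
      · exact le_of_lt (ih n v hch' _ h).1
    rcases hx with rfl | hx
    · exact ⟨hppn, hlast⟩
    · have := ih n v hch' x hx
      constructor
      · omega
      · exact this.2

theorem pvLookup (vals poss : List Int) (hnd : vals.Nodup) (hlen : vals.length = poss.length)
    (v : Int) (hv : v ∈ vals) :
    ((vals.zip poss).foldl (fun d p => d.insert p.1 p.2)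
      (PySem.Dict.empty : PySem.Dict Int Int)).getD v 0 ∈ poss := by
  have hkeys : ((vals.zip poss).map Prod.fst) = vals := List.map_fst_zip (le_of_eq hlen)
  have hfresh : ∀ a ∈ vals.zip poss,
      (PySem.Dict.empty : PySem.Dict Int Int).contains a.1 = false := by
    intro a _
    exact PySem.Dict.contains_empty _
  have hnodk : ((vals.zip poss).map Prod.fst).Nodup := by rw [hkeys]; exact hnd
  have hitems : ((vals.zip poss).foldl (fun d p => d.insert p.1 p.2)
      (PySem.Dict.empty : PySem.Dict Int Int)).items
      = (PySem.Dict.empty : PySem.Dict Int Int).items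
        ++ (vals.zip poss).map (fun a => (a.1, a.2)) := by
    exact PySem.Dict.items_foldl_insert_fresh (vals.zip poss) Prod.fst Prod.snd
      PySem.Dict.empty hfresh hnodk
  obtain ⟨j, hj, hvj⟩ := List.mem_iff_getElem.mp hv
  have hjp : j < poss.length := by omega
  have hzl : j < (vals.zip poss).length := by
    rw [List.length_zip, lt_min_iff]
    exact ⟨hj, by omega⟩
  have hpair : (v, poss[j]'hjp) ∈ (vals.zip poss) := by
    have h1 : (vals.zip poss)[j]'hzl = (vals[j]'hj, poss[j]'hjp) := List.getElem_zip
    rw [hvj] at h1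
    rw [← h1]
    exact List.getElem_mem hzl
  have hmem : (v, poss[j]'hjp) ∈ ((vals.zip poss).foldl (fun d p => d.insert p.1 p.2)
      (PySem.Dict.empty : PySem.Dict Int Int)).items := by
    rw [hitems]
    rw [List.mem_append]
    right
    simpa using hpair
  have hknd : ((vals.zip poss).foldl (fun d p => d.insert p.1 p.2)
      (PySem.Dict.empty : PySem.Dict Int Int)).keys.Nodup := by
    have := PySem.Dict.nodup_keys_foldl_insert_key (l := vals.zip poss) (key := Prod.fst)
      (f := fun d a => a.2) (d := (PySem.Dict.empty : PySem.Dict Int Int))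
      (PySem.Dict.nodup_keys_empty)
    exact this
  rw [PySem.Dict.getD_of_mem_items _ hmem hknd 0]
  exact List.getElem_mem hjp

theorem pvRowsCols_eq (items : List (List Int)) :
    pvRowsCols items = (PySem.Set.ofList (items.map (fun l => l.getD 0 0)),
      PySem.Set.ofList (items.map (fun l => l.getD 1 0))) := by
  unfold pvRowsCols
  rw [PySem.List.foldl_prod_mk (f := fun s (l : List Int) => PySem.Set.add s (l.getD 0 0))
      (g := fun s (l : List Int) => PySem.Set.add s (l.getD 1 0))]
  rw [← PySem.Set.update_map_eq_foldl_add, ← PySem.Set.update_map_eq_foldl_add,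
      PySem.Set.update_nil_left, PySem.Set.update_nil_left]

theorem pvPosAll (v0 : Int) (vs : List Int) (hch : List.Pairwise (· < ·) (v0 :: vs))
    (st : Int) (hst : 0 ≤ st) :
    ∀ x ∈ (st :: pvPosT st v0 vs), 0 ≤ x ∧ x ≤ (pvPosT st v0 vs).getLastD st := by
  intro x hx
  have hlastge : st ≤ (pvPosT st v0 vs).getLastD st := by
    rcases pvGetLastD_mem (pvPosT st v0 vs) st with h | h
    · omega
    · exact le_of_lt (pvPosT_bounds vs st v0 hch _ h).1
  rcases List.mem_cons.mp hx with rfl | hx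
  · exact ⟨hst, hlastge⟩
  · have := pvPosT_bounds vs st v0 hch x hx
    exact ⟨by omega, this.2⟩

def pvRunA (rows cols : List Int) (blocked : List (List Int)) (source target : List Int) : Bool :=
  let rcmp := pvCompressA rows (if rows.getD 0 0 ≠ 0 then 1 else 0)
  let ccmp := pvCompressA cols (if cols.getD 0 0 ≠ 0 then 1 else 0)
  let blk := PySem.Set.ofList
    (blocked.map (fun l => (rcmp.1.getD (l.getD 0 0) 0, ccmp.1.getD (l.getD 1 0) 0)))
  let s := (rcmp.1.getD (source.getD 0 0) 0, ccmp.1.getD (source.getD 1 0) 0)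
  let t := (rcmp.1.getD (target.getD 0 0) 0, ccmp.1.getD (target.getD 1 0) 0)
  let nrow := if rcmp.2 ≠ 10 ^ 6 + 1 then rcmp.2 + 1 else rcmp.2
  let ncol := if ccmp.2 ≠ 10 ^ 6 + 1 then ccmp.2 + 1 else ccmp.2
  pvBfsA nrow ncol blk (nrow.toNat * ncol.toNat + 2)
    (PySem.Set.add PySem.Set.empty s) (PySem.Set.add PySem.Set.empty t) PySem.Set.empty

def pvRunB (rows cols : List Int) (pts : List (Int × Int)) (source target : List Int) : Bool :=
  let rcmp := pvCompressB rows
  let ccmp := pvCompressB cols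
  let walls := PySem.Set.ofList (pts.map (fun rc => (rcmp.1.getD rc.1 0, ccmp.1.getD rc.2 0)))
  let s := (rcmp.1.getD (source.getD 0 0) 0, ccmp.1.getD (source.getD 1 0) 0)
  let t := (rcmp.1.getD (target.getD 0 0) 0, ccmp.1.getD (target.getD 1 0) 0)
  if s ∈ walls ∨ t ∈ walls then false
  else decide (t ∈ pvDfsB rcmp.2 ccmp.2 walls (5 * (rcmp.2.toNat * ccmp.2.toNat) + 6) [s]
    PySem.Set.empty)

theorem pvMainCore (rows cols : List Int) (blocked : List (List Int)) (source target : List Int)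
    (hr : rows.Pairwise (· < ·)) (hc : cols.Pairwise (· < ·))
    (hsr : source.getD 0 0 ∈ rows) (hsc : source.getD 1 0 ∈ cols)
    (htr : target.getD 0 0 ∈ rows) (htc : target.getD 1 0 ∈ cols) :
    pvRunA rows cols blocked source target
      = pvRunB rows cols (blocked.map (fun p => (p.getD 0 0, p.getD 1 0))) source target := by
  obtain ⟨r0, rtl, rfl⟩ : ∃ r0 rtl, rows = r0 :: rtl := by
    cases rows with
    | nil => simp at hsr
    | cons a l => exact ⟨a, l, rfl⟩
  obtain ⟨c0, ctl, rfl⟩ : ∃ c0 ctl, cols = c0 :: ctl := by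
    cases cols with
    | nil => simp at hsc
    | cons a l => exact ⟨a, l, rfl⟩
  have hstR : (if (r0 :: rtl).getD 0 0 ≠ 0 then (1 : Int) else 0)
      = (if r0 = 0 then (0 : Int) else 1) := by
    simp only [List.getD_cons_zero]
    by_cases h : r0 = 0 <;> simp [h]
  have hstC : (if (c0 :: ctl).getD 0 0 ≠ 0 then (1 : Int) else 0)
      = (if c0 = 0 then (0 : Int) else 1) := by
    simp only [List.getD_cons_zero]
    by_cases h : c0 = 0 <;> simp [h]
  have hdict : ∀ (l : List (Int × Int)), PySem.Dict.ofList l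
      = l.foldl (fun d p => d.insert p.1 p.2) PySem.Dict.empty := fun _ => rfl
  simp only [pvRunA, pvRunB]
  rw [hstR, hstC, pvCompA_spec r0 rtl hr _, pvCompA_spec c0 ctl hc _,
    pvCompB_spec r0 rtl, pvCompB_spec c0 ctl, hdict, hdict, List.map_map]
  -- name the shared data
  set SR : Int := if r0 = 0 then 0 else 1 with hSR
  set SC : Int := if c0 = 0 then 0 else 1 with hSC
  set DR := ((r0 :: rtl).zip (SR :: pvPosT SR r0 rtl)).foldl
    (fun d p => d.insert p.1 p.2) (PySem.Dict.empty : PySem.Dict Int Int) with hDR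
  set DC := ((c0 :: ctl).zip (SC :: pvPosT SC c0 ctl)).foldl
    (fun d p => d.insert p.1 p.2) (PySem.Dict.empty : PySem.Dict Int Int) with hDC
  set LR : Int := (pvPosT SR r0 rtl).getLastD SR with hLR
  set LC : Int := (pvPosT SC c0 ctl).getLastD SC with hLC
  set NR : Int := if LR + 1 ≠ 10 ^ 6 + 1 then LR + 1 + 1 else LR + 1 with hNR
  set NC : Int := if LC + 1 ≠ 10 ^ 6 + 1 then LC + 1 + 1 else LC + 1 with hNC
  have hSR0 : 0 ≤ SR := by rw [hSR]; split <;> omega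
  have hSC0 : 0 ≤ SC := by rw [hSC]; split <;> omega
  have hboundR : ∀ v ∈ (r0 :: rtl), 0 ≤ DR.getD v 0 ∧ DR.getD v 0 < NR := by
    intro v hv
    have hmem : DR.getD v 0 ∈ (SR :: pvPosT SR r0 rtl) := by
      rw [hDR]
      exact pvLookup _ _ hr.nodup (by simp [pvPosT_length]) v hv
    have := pvPosAll r0 rtl hr SR hSR0 _ hmem
    rw [hNR]
    constructor
    · exact this.1
    · split <;> omega
  have hboundC : ∀ v ∈ (c0 :: ctl), 0 ≤ DC.getD v 0 ∧ DC.getD v 0 < NC := by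
    intro v hv
    have hmem : DC.getD v 0 ∈ (SC :: pvPosT SC c0 ctl) := by
      rw [hDC]
      exact pvLookup _ _ hc.nodup (by simp [pvPosT_length]) v hv
    have := pvPosAll c0 ctl hc SC hSC0 _ hmem
    rw [hNC]
    constructor
    · exact this.1
    · split <;> omega
  have hLR0 : 0 ≤ LR := by
    rw [hLR]
    rcases pvGetLastD_mem (pvPosT SR r0 rtl) SR with h | h
    · omega
    · have := pvPosT_bounds rtl SR r0 hr _ h
      omega
  have hLC0 : 0 ≤ LC := by
    rw [hLC]
    rcases pvGetLastD_mem (pvPosT SC c0 ctl) SC with h | h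
    · omega
    · have := pvPosT_bounds ctl SC c0 hc _ h
      omega
  have hNRpos : 0 < NR := by rw [hNR]; split <;> omega
  have hNCpos : 0 < NC := by rw [hNC]; split <;> omega
  have hsin : pvInB NR NC (DR.getD (source.getD 0 0) 0, DC.getD (source.getD 1 0) 0) := by
    obtain ⟨h1, h2⟩ := hboundR _ hsr
    obtain ⟨h3, h4⟩ := hboundC _ hsc
    exact ⟨h1, h2, h3, h4⟩
  have htin : pvInB NR NC (DR.getD (target.getD 0 0) 0, DC.getD (target.getD 1 0) 0) := by
    obtain ⟨h1, h2⟩ := hboundR _ htr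
    obtain ⟨h3, h4⟩ := hboundC _ htc
    exact ⟨h1, h2, h3, h4⟩
  set sCell := (DR.getD (source.getD 0 0) 0, DC.getD (source.getD 1 0) 0) with hsCell
  set tCell := (DR.getD (target.getD 0 0) 0, DC.getD (target.getD 1 0) 0) with htCell
  set WALLS := PySem.Set.ofList (blocked.map
    (fun l => (DR.getD (l.getD 0 0) 0, DC.getD (l.getD 1 0) 0))) with hWALLS
  have hA := pvBfsA_char NR NC WALLS sCell tCell hNRpos hNCpos hsin htin
  show pvBfsA NR NC WALLS (NR.toNat * NC.toNat + 2) [sCell] [tCell] [] =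
    if sCell ∈ WALLS ∨ tCell ∈ WALLS then false
    else decide (tCell ∈ pvDfsB NR NC WALLS (5 * (NR.toNat * NC.toNat) + 6) [sCell] [])
  by_cases hw : sCell ∈ WALLS ∨ tCell ∈ WALLS
  · rw [if_pos hw]
    cases hres : pvBfsA NR NC WALLS (NR.toNat * NC.toNat + 2) [sCell] [tCell] [] with
    | false => rfl
    | true =>
      have hcn := hA.mp hres
      rcases hw with hw | hw
      · exact absurd hw (pvConn_free_left hcn).2
      · exact absurd hw (pvConn_free_right hcn).2
  · rw [if_neg hw]
    push_neg at hw
    have hfs : pvFree NR NC WALLS sCell := ⟨hsin, hw.1⟩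
    have hB := pvDfs_char NR NC WALLS sCell tCell hfs
    apply Bool.eq_iff_iff.mpr
    rw [decide_eq_true_iff, hA, hB]

theorem pv_main (blocked : List (List Int)) (source target : List Int) :
    isEscapePossible blocked source target = isEscapePossible_alt blocked source target := by
  show pvRunA (PySem.List.sorted (pvRowsCols (blocked ++ [source, target])).1 (fun x => x) false)
      (PySem.List.sorted (pvRowsCols (blocked ++ [source, target])).2 (fun x => x) false)
      blocked source target
    = pvRunB
      (PySem.List.sorted (PySem.Set.union (PySem.Set.ofList
        ((blocked.map (fun p => (p.getD 0 0, p.getD 1 0))).map (·.1)))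
        [source.getD 0 0, target.getD 0 0]) (fun x => x) false)
      (PySem.List.sorted (PySem.Set.union (PySem.Set.ofList
        ((blocked.map (fun p => (p.getD 0 0, p.getD 1 0))).map (·.2)))
        [source.getD 1 0, target.getD 1 0]) (fun x => x) false)
      (blocked.map (fun p => (p.getD 0 0, p.getD 1 0))) source target
  have h1 : PySem.Set.union (PySem.Set.ofList
      ((blocked.map (fun p => ((p.getD 0 0 : Int), (p.getD 1 0 : Int)))).map (·.1)))
      [source.getD 0 0, target.getD 0 0] = (pvRowsCols (blocked ++ [source, target])).1 := by
    simp only [pvRowsCols_eq, List.map_append, PySem.Set.ofList_append, List.map_map]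
    rfl
  have h2 : PySem.Set.union (PySem.Set.ofList
      ((blocked.map (fun p => ((p.getD 0 0 : Int), (p.getD 1 0 : Int)))).map (·.2)))
      [source.getD 1 0, target.getD 1 0] = (pvRowsCols (blocked ++ [source, target])).2 := by
    simp only [pvRowsCols_eq, List.map_append, PySem.Set.ofList_append, List.map_map]
    rfl
  rw [h1, h2, pvRowsCols_eq]
  exact pvMainCore _ _ blocked source target
    (PySem.List.sorted_ofList_pairwise_lt _) (PySem.List.sorted_ofList_pairwise_lt _)
    (by rw [PySem.List.mem_sorted]
        exact (PySem.Set.mem_ofList _ _).mpr (List.mem_map.mpr ⟨source, by simp, rfl⟩))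
    (by rw [PySem.List.mem_sorted]
        exact (PySem.Set.mem_ofList _ _).mpr (List.mem_map.mpr ⟨source, by simp, rfl⟩))
    (by rw [PySem.List.mem_sorted]
        exact (PySem.Set.mem_ofList _ _).mpr (List.mem_map.mpr ⟨target, by simp, rfl⟩))
    (by rw [PySem.List.mem_sorted]
        exact (PySem.Set.mem_ofList _ _).mpr (List.mem_map.mpr ⟨target, by simp, rfl⟩))

-- ===== VERDICT (by name: the statement is the Claim_ definition above) =====
theorem isEscapePossible_spec : Claim_equal_isEscapePossible := by
  intro b s t _ _
  unfold Spec_isEscapePossible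
  exact pv_main b s t
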